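-- pv_equiv track=rewrite | github.com/abailey81/implicit-interaction-intelligence | i3/benchmarks/runner.py | _latency_prompts
-- ===== SOURCE A (Python) =====
-- def _latency_prompts(n: int) -> list[str]:
--     base = [
--         "what is photosynthesis",
--         "tell me about Huawei",
--         "explain transformers",
--         "what's the capital of japan",
--         "summarise World War II in one sentence",
--         "how does a TCN work",
--         "give me a fun fact about whales",
--         "what does mitosis do",
--         "explain BPE tokenisation",
--         "what's the speed of light",
--     ]
--     out: list[str] = []
--     for i in range(n):
--         out.append(base[i % len(base)])
--     return out
-- ===== SOURCE B (Python) =====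
-- def _latency_prompts(n: int) -> list[str]:
--     base = [
--         "what is photosynthesis",
--         "tell me about Huawei",
--         "explain transformers",
--         "what's the capital of japan",
--         "summarise World War II in one sentence",
--         "how does a TCN work",
--         "give me a fun fact about whales",
--         "what does mitosis do",
--         "explain BPE tokenisation",
--         "what's the speed of light",
--     ]
--     if n <= 0:
--         return []
--     k = n // len(base) + 1
--     return (base * k)[:n]
-- ===== Notes on version B (the rewrite author's own statement) =====
-- stated objective: simpler
-- what changed: Replaces the per-index modulo append loop with one bulk repetition of the base list (base * k for the computed repetition count) followed by a single slice, with non-positive counts short-circuiting to an empty result.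
import Mathlib
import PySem

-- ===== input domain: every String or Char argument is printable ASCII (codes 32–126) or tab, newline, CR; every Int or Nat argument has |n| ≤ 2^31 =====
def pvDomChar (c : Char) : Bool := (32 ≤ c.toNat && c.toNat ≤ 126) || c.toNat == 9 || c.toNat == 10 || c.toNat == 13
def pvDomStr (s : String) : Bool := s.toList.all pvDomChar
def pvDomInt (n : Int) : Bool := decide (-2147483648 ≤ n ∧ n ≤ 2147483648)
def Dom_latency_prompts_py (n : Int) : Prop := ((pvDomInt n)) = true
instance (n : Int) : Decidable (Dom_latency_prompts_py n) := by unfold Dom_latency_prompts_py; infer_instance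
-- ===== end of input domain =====

-- B replaces A's per-index modulo loop with one bulk repetition (base * k) and a single
-- slice [:n]; objective: simpler (no measured speed claim).

-- ===== PORT A =====
-- A's local 'base' list literal
def pvBaseA : List String :=
  ["what is photosynthesis",
   "tell me about Huawei",
   "explain transformers",
   "what's the capital of japan",
   "summarise World War II in one sentence",
   "how does a TCN work",
   "give me a fun fact about whales",
   "what does mitosis do",
   "explain BPE tokenisation",
   "what's the speed of light"]

-- for i in range(n): out.append(base[i % len(base)])   (index always in range: pyGetD)
def latency_prompts_py (n : Int) : List String :=
  (PySem.List.pyRange 0 n 1).foldl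
    (fun out i => out ++ [PySem.List.pyGetD pvBaseA (PySem.Int.mod i (pvBaseA.length : Int)) ""]) []

-- ===== PORT B =====
-- B's local 'base' list literal
def pvBaseB : List String :=
  ["what is photosynthesis",
   "tell me about Huawei",
   "explain transformers",
   "what's the capital of japan",
   "summarise World War II in one sentence",
   "how does a TCN work",
   "give me a fun fact about whales",
   "what does mitosis do",
   "explain BPE tokenisation",
   "what's the speed of light"]

-- if n <= 0: []; k = n // len(base) + 1; (base * k)[:n]
def latency_prompts_py_alt (n : Int) : List String :=
  if n ≤ 0 then []
  else
    let k : Int := PySem.Int.floordiv n (pvBaseB.length : Int) + 1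
    PySem.List.slice (List.flatten (List.replicate k.toNat pvBaseB)) none (some n)

-- ===== PRECONDITION & SPEC =====
def Spec_latency_prompts_py (n : Int) (out : List String) : Prop := out = latency_prompts_py_alt n
instance (n : Int) (out : List String) : Decidable (Spec_latency_prompts_py n out) := by unfold Spec_latency_prompts_py; infer_instance

-- ===== CLAIM (what is proved, stated in full; the proofs are below) =====
def Claim_equal_latency_prompts_py : Prop := ∀ (n : Int), Dom_latency_prompts_py n → Spec_latency_prompts_py n (latency_prompts_py n)

-- ===== LEMMAS AND PROOFS =====

-- the repeated-base list, read at index i, is base[i % 10]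
theorem pv_flat_getD (j i : Nat) (h : i < 10 * j) :
    (List.flatten (List.replicate j pvBaseB)).getD i "" = pvBaseB.getD (i % 10) "" := by
  induction j generalizing i with
  | zero => omega
  | succ j ih =>
    rw [List.replicate_succ, List.flatten_cons]
    by_cases hi : i < 10
    · rw [List.getD_append _ _ _ _ (by simp [pvBaseB]; omega)]
      congr 1; omega
    · rw [List.getD_append_right _ _ _ _ (by simp [pvBaseB]; omega)]
      rw [show i - pvBaseB.length = i - 10 by simp [pvBaseB]]
      rw [ih (i - 10) (by omega), show (i - 10) % 10 = i % 10 by omega]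

-- B's truncated repetition as a map over range
theorem pv_take_flatten (m j : Nat) (h : m ≤ 10 * j) :
    (List.flatten (List.replicate j pvBaseB)).take m
      = (List.range m).map (fun i => pvBaseB.getD (i % 10) "") := by
  apply List.ext_getElem
  · simp [pvBaseB]; omega
  · intro i h1 h2
    simp only [List.getElem_take, List.getElem_map, List.getElem_range]
    have hl : ((List.flatten (List.replicate j pvBaseB)).take m).length = m := by
      simp [pvBaseB]; omega
    rw [← List.getD_eq_getElem _ "" (by simp [pvBaseB] at h1 ⊢; omega)]
    rw [pv_flat_getD j i (by rw [hl] at h1; omega)]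

-- A's loop as the same map over range
theorem pv_A_eq_map (n : Int) :
    latency_prompts_py n
      = (List.range n.toNat).map (fun i => pvBaseB.getD (i % 10) "") := by
  unfold latency_prompts_py
  rw [PySem.List.foldl_append_singleton_eq_map, PySem.List.pyRange_one, List.map_map]
  simp only [List.nil_append, Int.sub_zero]
  apply List.map_congr_left
  intro k _
  simp only [Function.comp]
  rw [show ((0 : Int) + (k : Int)) = (k : Int) by ring]
  rw [show (pvBaseA.length : Int) = ((10 : Nat) : Int) by simp [pvBaseA]]
  rw [PySem.Int.mod_natCast, PySem.List.pyGetD_natCast]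
  rfl

-- ===== VERDICT (by name: the statement is the Claim_ definition above) =====
theorem latency_prompts_py_spec : Claim_equal_latency_prompts_py := by
  intro n _
  unfold Spec_latency_prompts_py latency_prompts_py_alt
  by_cases hn : n ≤ 0
  · simp only [hn, if_pos]
    rw [pv_A_eq_map, show n.toNat = 0 by omega]
    simp
  · simp only [hn, if_false]
    have h10 : ((pvBaseB.length : Int)) = 10 := by simp [pvBaseB]
    rw [h10, PySem.List.slice_to (b := n) (xs := List.flatten (List.replicate (PySem.Int.floordiv n 10 + 1).toNat pvBaseB)) (by omega)]
    have hpos : (0 : Int) < 10 := by norm_num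
    have hfd : PySem.Int.floordiv n 10 = n / 10 := PySem.Int.floordiv_eq_ediv_of_pos hpos
    rw [pv_A_eq_map]
    rw [pv_take_flatten n.toNat (PySem.Int.floordiv n 10 + 1).toNat (by rw [hfd]; omega)]
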